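-- pv_equiv track=rewrite | github.com/jfbucas/advent_code_2022 | 2024/Day09/day.py | refrag
-- ===== SOURCE A (Python) =====
-- def refrag(dme):
-- 	free_indexes=[]
-- 	fileblocks = 0
-- 	i=0
-- 	for d in dme:
-- 		if d == ".":
-- 			free_indexes.append(i)
-- 		else:
-- 			fileblocks+=1
-- 		i+=1
--
-- 	dmed=list(dme)
-- 	last=len(dme)-1
-- 	for i in free_indexes:
-- 		if i >= fileblocks:
-- 			break
--
-- 		while dme[last] == ".":
-- 			last-=1
--
-- 		dmed[i] = dme[last]
-- 		dmed[last] = "."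
-- 		last-=1
--
-- 	return dmed
-- ===== SOURCE B (Python) =====
-- def refrag(dme):
-- 	# Closed-form compaction: count the file blocks, collect the movable
-- 	# blocks from the tail in reverse, and rebuild the list directly.
-- 	fileblocks = sum(1 for d in dme if d != ".")
-- 	movable = [d for d in reversed(dme[fileblocks:]) if d != "."]
-- 	out = []
-- 	k = 0
-- 	for d in dme[:fileblocks]:
-- 		if d != ".":
-- 			out.append(d)
-- 		else:
-- 			out.append(movable[k])
-- 			k += 1
-- 	out.extend(["."] * (len(dme) - fileblocks))
-- 	return out
-- ===== Notes on version B (the rewrite author's own statement) =====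
-- stated objective: simpler
-- what changed: Replaces A's stateful in-place compaction (precomputed free-index list, fileblock counter, backward-scanning 'last' pointer with break/while control) by a closed-form rebuild: count the file blocks F, collect the tail's movable blocks in reverse, and emit the first F slots with dots filled from that queue, followed by dots.
import Mathlib
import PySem

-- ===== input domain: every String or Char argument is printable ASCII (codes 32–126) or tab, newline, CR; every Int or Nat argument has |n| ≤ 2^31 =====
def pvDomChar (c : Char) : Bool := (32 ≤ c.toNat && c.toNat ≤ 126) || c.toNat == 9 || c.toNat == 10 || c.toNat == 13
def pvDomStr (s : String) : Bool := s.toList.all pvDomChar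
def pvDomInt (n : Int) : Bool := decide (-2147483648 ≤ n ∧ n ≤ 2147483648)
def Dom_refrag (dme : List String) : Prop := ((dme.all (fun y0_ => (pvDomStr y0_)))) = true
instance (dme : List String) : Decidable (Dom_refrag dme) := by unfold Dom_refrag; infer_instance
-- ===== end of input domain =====

-- B replaces A's in-place compaction bookkeeping by a closed-form rebuild (simpler decomposition; same O(n) cost).

-- ===== PORT A =====
-- while dme[last] == ".": last -= 1   (reads the ORIGINAL dme list, as A does)
-- (termination guard only: if the index leaves Python's range — IndexError territory, unreachable — we stop)
def refragScanA (dme : List String) (last : Int) : Int :=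
  if h : PySem.List.pyGet? dme last = some "." then refragScanA dme (last - 1) else last
termination_by (last + dme.length + 1).toNat
decreasing_by
  have hin : PySem.Raise.InRange dme.length last := by
    by_contra hc
    rw [(PySem.List.pyGet?_eq_none_iff dme last).mpr hc] at h
    simp at h
  have := hin.1
  omega

-- for i in free_indexes: if i >= fileblocks: break; …  (the 'none' branch is Python's IndexError, unreachable)
def refragLoopA (dme : List String) (fileblocks : Int) :
    List Int → List String → Int → List String
  | [], dmed, _ => dmed
  | i :: rest, dmed, last =>
    if i ≥ fileblocks then dmed
    else
      let l := refragScanA dme last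
      match PySem.List.pyGet? dme l with
      | none => dmed
      | some v =>
          refragLoopA dme fileblocks rest
            (PySem.List.pySetD (PySem.List.pySetD dmed i v) l ".") (l - 1)

def refrag (dme : List String) : List String :=
  let st := dme.foldl
    (fun (st : List Int × Int × Int) d =>
      if d == "." then (st.1 ++ [st.2.2], st.2.1, st.2.2 + 1)
      else (st.1, st.2.1 + 1, st.2.2 + 1)) ([], 0, 0)
  refragLoopA dme st.2.1 st.1 dme ((dme.length : Int) - 1)

-- ===== PORT B =====
def refrag_alt (dme : List String) : List String :=
  let fileblocks : Int := dme.foldl (fun a d => if d != "." then a + 1 else a) 0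
  let movable := ((PySem.List.slice dme (some fileblocks) none).reverse).filter (fun d => d != ".")
  let st := (PySem.List.slice dme none (some fileblocks)).foldl
    (fun (st : List String × Int) d =>
      if d != "." then (st.1 ++ [d], st.2)
      else (st.1 ++ [PySem.List.pyGetD movable st.2 ""], st.2 + 1)) ([], 0)
  st.1 ++ List.replicate ((dme.length : Int) - fileblocks).toNat "."

-- ===== PRECONDITION & SPEC =====
def Spec_refrag (dme : List String) (out : List String) : Prop := out = refrag_alt dme
instance (dme : List String) (out : List String) : Decidable (Spec_refrag dme out) := by unfold Spec_refrag; infer_instance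

-- ===== CLAIM (what is proved, stated in full; the proofs are below) =====
def Claim_equal_refrag : Prop := ∀ (dme : List String), Dom_refrag dme → Spec_refrag dme (refrag dme)

-- ===== LEMMAS AND PROOFS =====

-- ---- proof-side notation: dot/non-dot index lists, counts ----
def pvF (l : List String) : Nat := List.countP (fun d => d != ".") l
def pvDts (l : List String) : List Nat :=
  (List.range l.length).filter (fun j => l.getD j "" == ".")
def pvNds (l : List String) : List Nat :=
  (List.range l.length).filter (fun j => l.getD j "" != ".")
def pvD (l : List String) : Nat := ((pvDts l).filter (fun j => decide (j < pvF l))).length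
def pvTs (l : List String) : List Nat := (pvNds l).reverse
def pvMov (l : List String) : List String :=
  ((l.drop (pvF l)).reverse).filter (fun d => d != ".")
def pvState (l : List String) : Nat → List String
  | 0 => l
  | k+1 => ((pvState l k).set ((pvDts l).getD k 0) (l.getD ((pvTs l).getD k 0) ""))
             |>.set ((pvTs l).getD k 0) "."
def pvLastI (l : List String) : Nat → Int
  | 0 => (l.length : Int) - 1
  | k+1 => ((pvTs l).getD k 0 : Int) - 1
-- B-side fill recursion (the foldl's closed form)
def pvFill (movable : List String) : List String → Int → List String
  | [], _ => []
  | d :: rest, k =>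
    if d != "." then d :: pvFill movable rest k
    else PySem.List.pyGetD movable k "" :: pvFill movable rest (k + 1)

def pvC (j : Nat) : Int := (j : Int)

-- ---- generic lemmas ----
theorem pv_map_range (l : List String) :
    (List.range l.length).map (fun j => l.getD j "") = l := by
  apply List.ext_getElem (by simp)
  intro i h1 h2
  simp only [List.getElem_map, List.getElem_range]
  rw [List.getD_eq_getElem l "" h2]
theorem pv_map_range_take (l : List String) (j : Nat) (hj : j ≤ l.length) :
    (List.range j).map (fun m => l.getD m "") = l.take j := by
  apply List.ext_getElem (by simp; omega)
  intro i h1 h2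
  have hi : i < j := by simpa using h1
  simp only [List.getElem_map, List.getElem_range, List.getElem_take]
  rw [List.getD_eq_getElem l "" (by omega)]
theorem pv_count_range (l : List String) (P : String → Bool) :
    ((List.range l.length).filter (fun j => P (l.getD j ""))).length = List.countP P l := by
  conv_rhs => rw [← pv_map_range l]
  rw [List.countP_map, ← List.countP_eq_length_filter]
  rfl
theorem pv_count_take (l : List String) (P : String → Bool) (j : Nat) (hj : j ≤ l.length) :
    List.countP P (l.take j) = ((List.range j).filter (fun m => P (l.getD m ""))).length := by
  rw [← pv_map_range_take l j hj, List.countP_map, ← List.countP_eq_length_filter]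
  rfl
theorem pv_GP (xs : List Nat) (p : Nat → Bool) :
    (xs.filter p).length + (xs.filter (fun a => !(p a))).length = xs.length := by
  induction xs with
  | nil => simp
  | cons x xs ih =>
    by_cases h : p x <;> simp [List.filter_cons, h] <;> omega
theorem pv_G2 (xs : List Nat) (hs : xs.Pairwise (· < ·)) (c k : Nat) (hk : k < xs.length) :
    xs[k] < c ↔ k < (xs.filter (fun a => decide (a < c))).length := by
  induction xs generalizing k with
  | nil => simp at hk
  | cons x xs ih =>
    rw [List.pairwise_cons] at hs
    obtain ⟨hall, hs'⟩ := hs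
    by_cases hx : x < c
    · cases k with
      | zero => simpa [List.filter_cons, hx]
      | succ k =>
        simp only [List.getElem_cons_succ]
        rw [ih hs' k (by simpa using hk)]
        simp [List.filter_cons, hx]
    · have hnil : xs.filter (fun a => decide (a < c)) = [] := by
        rw [List.filter_eq_nil_iff]
        intro a ha
        have := hall a ha
        simp; omega
      cases k with
      | zero => simp [List.filter_cons, hx, hnil]
      | succ k =>
        have hk' : k < xs.length := by simpa using hk
        have := hall _ (xs.getElem_mem hk')
        simp only [List.getElem_cons_succ, List.filter_cons, hnil]
        simp [hx]
        omega
theorem pv_G3 (xs : List Nat) (hs : xs.Pairwise (· < ·)) (k : Nat) (hk : k < xs.length) :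
    (xs.filter (fun a => decide (a < xs[k]))).length = k := by
  have hmono := List.pairwise_iff_getElem.mp hs
  set L := (xs.filter (fun a => decide (a < xs[k]))).length with hL
  have hLle : L ≤ xs.length := by
    rw [hL]; exact le_trans (List.length_filter_le _ _) (le_refl _)
  have h2 := pv_G2 xs hs xs[k] k hk
  have hkL : ¬ k < L := fun h => absurd (h2.mpr h) (lt_irrefl _)
  by_contra hne
  have hLk : L < k := by omega
  have hLlen : L < xs.length := by omega
  have h3 := pv_G2 xs hs xs[k] L hLlen
  have : xs[L] < xs[k] := hmono L k hLlen hk hLk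
  have : L < L := h3.mp this
  omega
theorem pv_G5 (xs : List Nat) (hs : xs.Pairwise (· < ·)) (c : Nat) :
    xs.filter (fun a => !decide (a < c)) = xs.drop ((xs.filter (fun a => decide (a < c))).length) := by
  induction xs with
  | nil => simp
  | cons x xs ih =>
    rw [List.pairwise_cons] at hs
    obtain ⟨hall, hs'⟩ := hs
    by_cases hx : x < c
    · simp [List.filter_cons, hx, ih hs']
    · have hself : xs.filter (fun a => !decide (a < c)) = xs := by
        rw [List.filter_eq_self]
        intro a ha
        have := hall a ha
        simp; omega
      have hnil : xs.filter (fun a => decide (a < c)) = [] := by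
        rw [List.filter_eq_nil_iff]
        intro a ha
        have := hall a ha
        simp; omega
      simp [List.filter_cons, hx, hself, hnil]
theorem pv_RS (n c : Nat) (hc : c ≤ n) (r : Nat → Bool) :
    (List.range n).filter (fun j => decide (j < c) && r j) = (List.range c).filter r := by
  have hn : n = c + (n - c) := by omega
  rw [hn, List.range_add, List.filter_append]
  have h1 : (List.range c).filter (fun j => decide (j < c) && r j) = (List.range c).filter r := by
    apply List.filter_congr
    intro a ha
    simp only [List.mem_range] at ha
    simp [ha]
  have h2 : ((List.range (n - c)).map (c + ·)).filter (fun j => decide (j < c) && r j) = [] := by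
    rw [List.filter_eq_nil_iff]
    intro a ha
    simp only [List.mem_map] at ha
    obtain ⟨j, _, rfl⟩ := ha
    simp
  rw [h1, h2, List.append_nil]
theorem pv_RS2 (n c : Nat) (hc : c ≤ n) (r : Nat → Bool) :
    (List.range n).filter (fun j => !decide (j < c) && r j)
      = ((List.range (n - c)).filter (fun j => r (c + j))).map (c + ·) := by
  have hn : n = c + (n - c) := by omega
  rw [hn, List.range_add, List.filter_append]
  have h1 : (List.range c).filter (fun j => !decide (j < c) && r j) = [] := by
    rw [List.filter_eq_nil_iff]
    intro a ha
    simp only [List.mem_range] at ha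
    simp [ha]
  have h2 : ((List.range (n - c)).map (c + ·)).filter (fun j => !decide (j < c) && r j)
      = ((List.range (n - c)).filter (fun j => r (c + j))).map (c + ·) := by
    rw [List.filter_map]
    congr 1
    apply List.filter_congr
    intro a _
    simp [Function.comp]
  rw [h1, h2, List.nil_append]
  have hcc : c + (n - c) - c = n - c := by omega
  rw [hcc]

-- ---- ds/us basics ----
theorem pv_mem_dts (l : List String) (j : Nat) :
    j ∈ pvDts l ↔ j < l.length ∧ l.getD j "" = "." := by
  simp [pvDts, List.mem_filter, List.mem_range]
theorem pv_mem_nds (l : List String) (j : Nat) :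
    j ∈ pvNds l ↔ j < l.length ∧ l.getD j "" ≠ "." := by
  simp [pvNds, List.mem_filter, List.mem_range]
theorem pv_dts_pairwise (l : List String) : (pvDts l).Pairwise (· < ·) := by
  exact List.Pairwise.filter _ (List.pairwise_lt_range)
theorem pv_nds_pairwise (l : List String) : (pvNds l).Pairwise (· < ·) := by
  exact List.Pairwise.filter _ (List.pairwise_lt_range)
theorem pv_len_nds (l : List String) : (pvNds l).length = pvF l := by
  unfold pvNds pvF
  exact pv_count_range l (fun d => d != ".")
theorem pv_F_le (l : List String) : pvF l ≤ l.length := by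
  unfold pvF
  exact List.countP_le_length
theorem pv_CD (l : List String) :
    pvD l + ((pvNds l).filter (fun j => decide (j < pvF l))).length = pvF l := by
  have hF := pv_F_le l
  have h1 : (pvDts l).filter (fun j => decide (j < pvF l))
      = (List.range (pvF l)).filter (fun j => l.getD j "" == ".") := by
    unfold pvDts
    rw [List.filter_filter]
    exact pv_RS l.length (pvF l) hF _
  have h2 : (pvNds l).filter (fun j => decide (j < pvF l))
      = (List.range (pvF l)).filter (fun j => l.getD j "" != ".") := by
    unfold pvNds
    rw [List.filter_filter]
    exact pv_RS l.length (pvF l) hF _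
  have h3 : (fun j => l.getD j "" != ".") = (fun j => !(l.getD j "" == ".")) := rfl
  unfold pvD
  rw [h1, h2, h3, pv_GP]
  simp
theorem pv_D_le_F (l : List String) : pvD l ≤ pvF l := by
  have := pv_CD l; omega
theorem pv_D_le_len_dts (l : List String) : pvD l ≤ (pvDts l).length := by
  exact List.length_filter_le _ _
theorem pv_ts_getD (l : List String) (k : Nat) (hk : k < pvF l) :
    (pvTs l).getD k 0 = (pvNds l).getD (pvF l - 1 - k) 0 := by
  have hlen := pv_len_nds l
  have hk1 : k < (pvNds l).reverse.length := by simp [hlen]; omega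
  have hk2 : pvF l - 1 - k < (pvNds l).length := by omega
  unfold pvTs
  rw [List.getD_eq_getElem _ _ hk1, List.getD_eq_getElem _ _ hk2,
    List.getElem_reverse]
  congr 1
  omega
theorem pv_us_lt_iff (l : List String) (m : Nat) (hm : m < pvF l) :
    (pvNds l).getD m 0 < pvF l ↔ m < pvF l - pvD l := by
  have hp := pv_nds_pairwise l
  have hlen := pv_len_nds l
  have hcd := pv_CD l
  have hm' : m < (pvNds l).length := by omega
  rw [List.getD_eq_getElem _ _ hm']
  rw [pv_G2 _ hp (pvF l) m hm']
  omega
theorem pv_ts_ge (l : List String) (k : Nat) (hk : k < pvD l) :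
    pvF l ≤ (pvTs l).getD k 0 := by
  have hD := pv_D_le_F l
  have hkF : k < pvF l := by omega
  rw [pv_ts_getD l k hkF]
  have h := pv_us_lt_iff l (pvF l - 1 - k) (by omega)
  by_contra hc
  have : pvF l - 1 - k < pvF l - pvD l := h.mp (by omega)
  omega
theorem pv_ts_lt_len (l : List String) (k : Nat) (hk : k < pvD l) :
    (pvTs l).getD k 0 < l.length := by
  have hD := pv_D_le_F l
  have hkF : k < pvF l := by omega
  rw [pv_ts_getD l k hkF]
  have hlen := pv_len_nds l
  have hm : pvF l - 1 - k < (pvNds l).length := by omega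
  rw [List.getD_eq_getElem _ _ hm]
  have := (pv_mem_nds l _).mp (List.getElem_mem hm)
  exact this.1
theorem pv_ts_nondot (l : List String) (k : Nat) (hk : k < pvD l) :
    l.getD ((pvTs l).getD k 0) "" ≠ "." := by
  have hD := pv_D_le_F l
  have hkF : k < pvF l := by omega
  rw [pv_ts_getD l k hkF]
  have hlen := pv_len_nds l
  have hm : pvF l - 1 - k < (pvNds l).length := by omega
  rw [List.getD_eq_getElem _ _ hm]
  have := (pv_mem_nds l _).mp (List.getElem_mem hm)
  exact this.2
theorem pv_ts_mono (l : List String) (k1 k2 : Nat) (h1 : k1 < k2) (h2 : k2 < pvD l) :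
    (pvTs l).getD k2 0 < (pvTs l).getD k1 0 := by
  have hD := pv_D_le_F l
  have h1F : k1 < pvF l := by omega
  have h2F : k2 < pvF l := by omega
  rw [pv_ts_getD l k1 h1F, pv_ts_getD l k2 h2F]
  have hlen := pv_len_nds l
  have hm1 : pvF l - 1 - k1 < (pvNds l).length := by omega
  have hm2 : pvF l - 1 - k2 < (pvNds l).length := by omega
  rw [List.getD_eq_getElem _ _ hm1, List.getD_eq_getElem _ _ hm2]
  exact (List.pairwise_iff_getElem.mp (pv_nds_pairwise l)) _ _ hm2 hm1 (by omega)
theorem pv_dts_lt_F (l : List String) (k : Nat) (hk : k < (pvDts l).length) :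
    (pvDts l)[k] < pvF l ↔ k < pvD l := by
  exact pv_G2 _ (pv_dts_pairwise l) (pvF l) k hk

-- ---- scan ----
theorem pv_scan (l : List String) (m : Nat) (last : Int)
    (h1 : (m : Int) ≤ last) (h2 : last < l.length)
    (h3 : l.getD m "" ≠ ".")
    (h4 : ∀ j : Nat, m < j → (j : Int) ≤ last → l.getD j "" = ".") :
    refragScanA l last = m := by
  have key : ∀ (fuel : Nat) (last : Int), (last - m).toNat = fuel → (m : Int) ≤ last →
      last < l.length → (∀ j : Nat, m < j → (j : Int) ≤ last → l.getD j "" = ".") →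
      refragScanA l last = m := by
    intro fuel
    induction fuel with
    | zero =>
      intro last hf hb1 hb2 hb4
      have hlm : last = (m : Int) := by omega
      subst hlm
      have hmn : m < l.length := by exact_mod_cast hb2
      rw [refragScanA]
      rw [dif_neg]
      rw [PySem.List.pyGet?_natCast, List.getElem?_eq_getElem hmn]
      intro hcontra
      apply h3
      rw [List.getD_eq_getElem l "" hmn]
      simpa using hcontra
    | succ fuel ih =>
      intro last hf hb1 hb2 hb4
      have hml : (m : Int) < last := by omega
      have h0 : (0 : Int) ≤ last := by omega
      have hjl : ((last.toNat : Nat) : Int) = last := by omega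
      have hjn : last.toNat < l.length := by omega
      have hdot : l.getD last.toNat "" = "." := hb4 last.toNat (by omega) (by omega)
      rw [refragScanA]
      rw [dif_pos]
      · exact ih (last - 1) (by omega) (by omega) (by omega)
          (fun j' hj1 hj2 => hb4 j' hj1 (by omega))
      · rw [← hjl, PySem.List.pyGet?_natCast, List.getElem?_eq_getElem hjn]
        rw [List.getD_eq_getElem l "" hjn] at hdot
        simp [hdot]
  exact key ((last - m).toNat) last rfl h1 h2 h4
theorem pv_gap (l : List String) (k : Nat) (hk : k < pvD l) (j : Nat)
    (hjn : j < l.length) (hlo : (pvTs l).getD k 0 < j)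
    (hhi : k = 0 ∨ j < (pvTs l).getD (k - 1) 0) :
    l.getD j "" = "." := by
  have hD := pv_D_le_F l
  have hlen := pv_len_nds l
  by_contra hnd
  have hmem : j ∈ pvNds l := (pv_mem_nds l j).mpr ⟨hjn, hnd⟩
  obtain ⟨idx, hidx, hval⟩ := List.getElem_of_mem hmem
  have hidxF : idx < pvF l := by omega
  have hkF : k < pvF l := by omega
  rw [pv_ts_getD l k hkF] at hlo
  have hmk : pvF l - 1 - k < (pvNds l).length := by omega
  rw [List.getD_eq_getElem _ _ hmk] at hlo
  have hmono := List.pairwise_iff_getElem.mp (pv_nds_pairwise l)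
  -- idx > F - 1 - k
  have hgt : pvF l - 1 - k < idx := by
    by_contra hle
    rcases Nat.lt_or_ge idx (pvF l - 1 - k) with hlt | hge
    · have := hmono idx (pvF l - 1 - k) hidx hmk hlt
      omega
    · have : idx = pvF l - 1 - k := by omega
      subst this
      omega
  rcases hhi with h0 | hub
  · subst h0
    omega
  · have hk1 : k - 1 < pvF l := by omega
    rw [pv_ts_getD l (k-1) hk1] at hub
    have hmk1 : pvF l - 1 - (k - 1) < (pvNds l).length := by omega
    rw [List.getD_eq_getElem _ _ hmk1] at hub
    -- j = us[idx] < us[F-1-(k-1)] hence idx < F - k ≤ idx, contradiction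
    have hlt2 : idx < pvF l - 1 - (k - 1) := by
      by_contra hge
      rcases Nat.lt_or_ge (pvF l - 1 - (k-1)) idx with hlt | _
      · have := hmono (pvF l - 1 - (k-1)) idx hmk1 hidx hlt
        omega
      · have : idx = pvF l - 1 - (k - 1) := by omega
        subst this
        omega
    omega

theorem pv_scan_val (l : List String) (k : Nat) (hk : k < pvD l) :
    refragScanA l (pvLastI l k) = ((pvTs l).getD k 0 : Int) := by
  have hD := pv_D_le_F l
  cases k with
  | zero =>
    have hlt := pv_ts_lt_len l 0 hk
    apply pv_scan l ((pvTs l).getD 0 0) (pvLastI l 0) (by simp only [pvLastI]; omega) (by simp only [pvLastI]; omega)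
      (pv_ts_nondot l 0 hk)
    intro j hj1 hj2
    simp only [pvLastI] at hj2
    exact pv_gap l 0 hk j (by omega) hj1 (Or.inl rfl)
  | succ k' =>
    have hlt := pv_ts_lt_len l k' (by omega)
    have hmono := pv_ts_mono l k' (k'+1) (by omega) hk
    apply pv_scan l ((pvTs l).getD (k'+1) 0) (pvLastI l (k'+1)) (by simp only [pvLastI]; omega) (by simp only [pvLastI]; omega)
      (pv_ts_nondot l (k'+1) hk)
    intro j hj1 hj2
    simp only [pvLastI] at hj2
    exact pv_gap l (k'+1) hk j (by omega) hj1 (Or.inr (by simp only [Nat.add_sub_cancel]; omega))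

theorem pv_dts_getD_lt_F (l : List String) (k : Nat) (hk : k < pvD l) :
    (pvDts l).getD k 0 < pvF l := by
  have hklen : k < (pvDts l).length := lt_of_lt_of_le hk (pv_D_le_len_dts l)
  rw [List.getD_eq_getElem _ _ hklen]
  exact (pv_dts_lt_F l k hklen).mpr hk

theorem pv_dts_getD_mono (l : List String) (k1 k2 : Nat) (h1 : k1 < k2)
    (h2 : k2 < (pvDts l).length) :
    (pvDts l).getD k1 0 < (pvDts l).getD k2 0 := by
  rw [List.getD_eq_getElem _ _ (by omega), List.getD_eq_getElem _ _ h2]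
  exact (List.pairwise_iff_getElem.mp (pv_dts_pairwise l)) _ _ (by omega) h2 h1

theorem pv_dts_getD_dot (l : List String) (k : Nat) (hk : k < (pvDts l).length) :
    l.getD ((pvDts l).getD k 0) "" = "." := by
  rw [List.getD_eq_getElem _ _ hk]
  exact ((pv_mem_dts l _).mp (List.getElem_mem hk)).2


-- ---- state ----
theorem pv_state_len (l : List String) (k : Nat) : (pvState l k).length = l.length := by
  induction k with
  | zero => rfl
  | succ k ih => simp only [pvState, List.length_set, ih]
theorem pv_state_untouched (l : List String) (k : Nat) (hk : k ≤ pvD l) (j : Nat)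
    (hj : ∀ m : Nat, m < k → (pvDts l).getD m 0 ≠ j ∧ (pvTs l).getD m 0 ≠ j) :
    (pvState l k)[j]? = l[j]? := by
  induction k with
  | zero => rfl
  | succ k ih =>
    have h := hj k (Nat.lt_succ_self k)
    simp only [pvState]
    rw [List.getElem?_set_ne h.2, List.getElem?_set_ne h.1]
    exact ih (by omega) (fun m hm => hj m (by omega))
theorem pv_state_filled (l : List String) (k : Nat) (hk : k < pvD l) (k' : Nat)
    (h1 : k < k') (h2 : k' ≤ pvD l) :
    (pvState l k')[(pvDts l).getD k 0]? = some (l.getD ((pvTs l).getD k 0) "") := by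
  have key : ∀ (k' : Nat), k < k' → k' ≤ pvD l →
      (pvState l k')[(pvDts l).getD k 0]? = some (l.getD ((pvTs l).getD k 0) "") := by
    intro k'
    induction k' with
    | zero => omega
    | succ k'' ih =>
      intro ha hb
      by_cases hkk : k'' = k
      · subst hkk
        simp only [pvState]
        have hdk := pv_dts_getD_lt_F l k'' hk
        have hne : (pvTs l).getD k'' 0 ≠ (pvDts l).getD k'' 0 := by
          have := pv_ts_ge l k'' hk; omega
        rw [List.getElem?_set_ne hne]
        have hlt : (pvDts l).getD k'' 0 < (pvState l k'').length := by
          rw [pv_state_len]; have := pv_F_le l; omega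
        exact List.getElem?_set_eq_of_lt _ hlt
      · have hk2 : k < k'' := by omega
        have hk''D : k'' < pvD l := by omega
        simp only [pvState]
        have hne1 : (pvTs l).getD k'' 0 ≠ (pvDts l).getD k 0 := by
          have := pv_ts_ge l k'' hk''D
          have := pv_dts_getD_lt_F l k hk
          omega
        have hne2 : (pvDts l).getD k'' 0 ≠ (pvDts l).getD k 0 := by
          have := pv_dts_getD_mono l k k'' hk2 (lt_of_lt_of_le hk''D (pv_D_le_len_dts l))
          omega
        rw [List.getElem?_set_ne hne1, List.getElem?_set_ne hne2]
        exact ih hk2 (by omega)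
  exact key k' h1 h2
theorem pv_state_dotted (l : List String) (k : Nat) (hk : k < pvD l) (k' : Nat)
    (h1 : k < k') (h2 : k' ≤ pvD l) :
    (pvState l k')[(pvTs l).getD k 0]? = some "." := by
  have key : ∀ (k' : Nat), k < k' → k' ≤ pvD l →
      (pvState l k')[(pvTs l).getD k 0]? = some "." := by
    intro k'
    induction k' with
    | zero => omega
    | succ k'' ih =>
      intro ha hb
      by_cases hkk : k'' = k
      · subst hkk
        simp only [pvState]
        have hlt : (pvTs l).getD k'' 0 <
            ((pvState l k'').set ((pvDts l).getD k'' 0) (l.getD ((pvTs l).getD k'' 0) "")).length := by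
          rw [List.length_set, pv_state_len]
          exact pv_ts_lt_len l k'' hk
        exact List.getElem?_set_eq_of_lt _ hlt
      · have hk2 : k < k'' := by omega
        have hk''D : k'' < pvD l := by omega
        simp only [pvState]
        have hne1 : (pvTs l).getD k'' 0 ≠ (pvTs l).getD k 0 := by
          have := pv_ts_mono l k k'' hk2 hk''D
          omega
        have hne2 : (pvDts l).getD k'' 0 ≠ (pvTs l).getD k 0 := by
          have := pv_ts_ge l k hk
          have := pv_dts_getD_lt_F l k'' hk''D
          omega
        rw [List.getElem?_set_ne hne1, List.getElem?_set_ne hne2]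
        exact ih hk2 (by omega)
  exact key k' h1 h2

-- ---- A side ----
def pvDIdx : Int → List String → List Int
  | _, [] => []
  | i, x :: xs => if x == "." then i :: pvDIdx (i+1) xs else pvDIdx (i+1) xs
theorem pv_foldA (t : List String) (acc : List Int) (fb i : Int) :
    t.foldl (fun (st : List Int × Int × Int) d =>
      if d == "." then (st.1 ++ [st.2.2], st.2.1, st.2.2 + 1)
      else (st.1, st.2.1 + 1, st.2.2 + 1)) (acc, fb, i)
    = (acc ++ pvDIdx i t, fb + (List.countP (fun d => d != ".") t : Nat), i + t.length) := by
  induction t generalizing acc fb i with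
  | nil => simp [pvDIdx]
  | cons x xs ih =>
    by_cases h : x == "."
    · rw [List.foldl_cons, if_pos h, ih]
      have hx : (x != ".") = false := by simp_all
      rw [Prod.mk.injEq, Prod.mk.injEq]
      refine ⟨by simp [pvDIdx, h], by simp [List.countP_cons, hx], by push_cast [List.length_cons]; ring⟩
    · rw [List.foldl_cons, if_neg h, ih]
      have hx : (x != ".") = true := by simp_all
      rw [Prod.mk.injEq, Prod.mk.injEq]
      refine ⟨by simp [pvDIdx, h], by simp [List.countP_cons, hx]; push_cast; ring,
        by push_cast [List.length_cons]; ring⟩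
theorem pv_dIdx_cast (t : List String) (i : Nat) :
    pvDIdx (i : Int) t
      = ((List.range t.length).filter (fun j => t.getD j "" == ".")).map (fun j => pvC (i + j)) := by
  induction t generalizing i with
  | nil => simp [pvDIdx]
  | cons x xs ih =>
    simp only [List.length_cons, List.range_succ_eq_map]
    rw [List.filter_cons]
    by_cases h : x == "."
    · have hx : ((x :: xs).getD 0 "" == ".") = true := by simpa using h
      simp only [pvDIdx, h, if_pos, hx]
      rw [List.filter_map]
      have hcomp : ((fun j => (x :: xs).getD j "" == ".") ∘ Nat.succ)
          = (fun j => xs.getD j "" == ".") := by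
        funext j; simp [List.getD_cons_succ]
      rw [hcomp, List.map_cons, List.map_map]
      have hi1 : (i : Int) + 1 = ((i + 1 : Nat) : Int) := by push_cast; ring
      rw [hi1, ih (i + 1)]
      rw [List.cons_eq_cons]
      refine ⟨by simp [pvC], ?_⟩
      apply List.map_congr_left
      intro a _
      simp [pvC]
      push_cast
      ring
    · have hx : ((x :: xs).getD 0 "" == ".") = false := by simpa using h
      simp only [pvDIdx, h, hx, if_false, Bool.false_eq_true]
      rw [List.filter_map]
      have hcomp : ((fun j => (x :: xs).getD j "" == ".") ∘ Nat.succ)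
          = (fun j => xs.getD j "" == ".") := by
        funext j; simp [List.getD_cons_succ]
      rw [hcomp, List.map_map]
      have hi1 : (i : Int) + 1 = ((i + 1 : Nat) : Int) := by push_cast; ring
      rw [hi1, ih (i + 1)]
      apply List.map_congr_left
      intro a _
      simp [pvC]
      push_cast
      ring
theorem pv_loop (l : List String) (k : Nat) (hk : k ≤ pvD l) :
    refragLoopA l (pvF l) (((pvDts l).drop k).map pvC) (pvState l k) (pvLastI l k)
      = pvState l (pvD l) := by
  have key : ∀ (m k : Nat), pvD l - k = m → k ≤ pvD l →
      refragLoopA l (pvF l) (((pvDts l).drop k).map pvC) (pvState l k)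
        (pvLastI l k) = pvState l (pvD l) := by
    intro m
    induction m with
    | zero =>
      intro k hm hk'
      have hkD : k = pvD l := by omega
      subst hkD
      rcases hdrop : (pvDts l).drop (pvD l) with _ | ⟨a, rest⟩
      · simp [refragLoopA]
      · have hlen : pvD l < (pvDts l).length := by
          by_contra hc
          rw [List.drop_eq_nil_of_le (by omega)] at hdrop
          simp at hdrop
        have ha : (pvDts l)[pvD l]'hlen = a := by
          have h0 := congrArg (fun t => t[0]?) hdrop
          simp only [List.getElem?_drop, Nat.add_zero, List.getElem?_cons_zero] at h0
          rw [List.getElem?_eq_getElem hlen] at h0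
          exact Option.some.inj h0
        have haF : pvF l ≤ a := by
          rw [← ha]
          have := (pv_dts_lt_F l (pvD l) hlen)
          omega
        rw [List.map_cons, refragLoopA]
        rw [if_pos (by simp only [pvC]; exact_mod_cast haF)]
    | succ m ih =>
      intro k hm hk'
      have hkD : k < pvD l := by omega
      have hklen : k < (pvDts l).length := lt_of_lt_of_le hkD (pv_D_le_len_dts l)
      have hdrop : (pvDts l).drop k = (pvDts l)[k] :: (pvDts l).drop (k + 1) :=
        List.drop_eq_getElem_cons hklen
      rw [hdrop, List.map_cons]
      simp only [pvC]
      rw [refragLoopA]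
      rw [if_neg (by
        have := (pv_dts_lt_F l k hklen).mpr hkD
        intro hc
        have : pvF l ≤ (pvDts l)[k] := by exact_mod_cast hc
        omega)]
      have hscan : refragScanA l (pvLastI l k) = ((pvTs l).getD k 0 : Int) :=
        pv_scan_val l k hkD
      have htlen := pv_ts_lt_len l k hkD
      have hget : PySem.List.pyGet? l (((pvTs l).getD k 0 : Nat) : Int)
          = some (l.getD ((pvTs l).getD k 0) "") := by
        rw [PySem.List.pyGet?_natCast, List.getElem?_eq_getElem htlen,
          List.getD_eq_getElem l "" htlen]
      simp only [hscan, hget]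
      have hset1 : PySem.List.pySetD (pvState l k) ((pvDts l)[k] : Int)
          (l.getD ((pvTs l).getD k 0) "")
          = (pvState l k).set ((pvDts l).getD k 0) (l.getD ((pvTs l).getD k 0) "") := by
        rw [PySem.List.pySetD_natCast, List.getD_eq_getElem _ _ hklen]
      have hset2 : PySem.List.pySetD
          ((pvState l k).set ((pvDts l).getD k 0) (l.getD ((pvTs l).getD k 0) ""))
          (((pvTs l).getD k 0 : Nat) : Int) "."
          = pvState l (k + 1) := by
        rw [PySem.List.pySetD_natCast]
        rfl
      rw [hset1, hset2]
      have hlast : ((pvTs l).getD k 0 : Int) - 1 = pvLastI l (k + 1) := rfl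
      rw [hlast]
      exact ih (k + 1) (by omega) (by omega)
  exact key (pvD l - k) k rfl hk
theorem pv_refrag_eq_state (l : List String) : refrag l = pvState l (pvD l) := by
  unfold refrag
  rw [pv_foldA]
  have h0 : (0 : Int) = ((0 : Nat) : Int) := rfl
  rw [h0, pv_dIdx_cast]
  have hmap : ((List.range l.length).filter (fun j => l.getD j "" == ".")).map
      (fun j => pvC (0 + j)) = ((pvDts l).map pvC) := by
    unfold pvDts
    apply List.map_congr_left
    intro a _
    simp
  rw [hmap]
  have hloop := pv_loop l 0 (Nat.zero_le _)
  rw [List.drop_zero] at hloop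
  simp only [List.nil_append]
  show refragLoopA l (0 + (List.countP (fun d => d != ".") l : Nat)) ((pvDts l).map pvC) l
      ((l.length : Int) - 1) = pvState l (pvD l)
  have hfb : (0 : Int) + (List.countP (fun d => d != ".") l : Nat) = ((pvF l : Nat) : Int) := by
    simp [pvF]
  rw [hfb]
  exact hloop

-- ---- B side ----
theorem pv_foldB_count (l : List String) :
    l.foldl (fun (a : Int) d => if d != "." then a + 1 else a) 0 = (pvF l : Int) := by
  rw [PySem.List.foldl_count_if]
  simp [pvF]
theorem pv_foldB_fill (movable : List String) (t : List String) (acc : List String) (k : Int) :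
    t.foldl (fun (st : List String × Int) d =>
        if d != "." then (st.1 ++ [d], st.2)
        else (st.1 ++ [PySem.List.pyGetD movable st.2 ""], st.2 + 1)) (acc, k)
      = (acc ++ pvFill movable t k, k + (List.countP (fun d => d == ".") t : Nat)) := by
  induction t generalizing acc k with
  | nil => simp [pvFill]
  | cons x xs ih =>
    by_cases h : x != "."
    · rw [List.foldl_cons, if_pos h, ih]
      have hx : (x == ".") = false := by simp_all
      rw [Prod.mk.injEq]
      refine ⟨by simp [pvFill, h], by simp [List.countP_cons, hx]⟩
    · rw [List.foldl_cons, if_neg h, ih]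
      have hx : (x == ".") = true := by simp_all
      rw [Prod.mk.injEq]
      refine ⟨by simp [pvFill, h], by simp [List.countP_cons, hx]; push_cast; ring⟩
theorem pv_fill_len (movable t : List String) (k : Int) :
    (pvFill movable t k).length = t.length := by
  induction t generalizing k with
  | nil => rfl
  | cons x xs ih =>
    by_cases h : x != "." <;> simp [pvFill, h, ih]
theorem pv_fill_getElem (movable t : List String) (k j : Nat) (hj : j < t.length) :
    (pvFill movable t (k : Int))[j]?
      = some (if t.getD j "" != "." then t.getD j ""
              else movable.getD (k + List.countP (fun d => d == ".") (t.take j)) "") := by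
  induction t generalizing k j with
  | nil => simp at hj
  | cons x xs ih =>
    by_cases h : x != "."
    · cases j with
      | zero => simp [pvFill, h]
      | succ j =>
        have hj' : j < xs.length := by simpa using hj
        have hx : (x == ".") = false := by simp_all
        simp only [pvFill, h, if_true, List.getElem?_cons_succ, List.getD_cons_succ,
          List.take_succ_cons, List.countP_cons, hx, if_false, Bool.false_eq_true,
          Nat.add_zero]
        rw [ih k j hj']
    · have hx : (x == ".") = true := by simp_all
      cases j with
      | zero =>
        simp only [pvFill, h, if_false, Bool.false_eq_true, List.getElem?_cons_zero,
          List.getD_cons_zero, List.take_zero, List.countP_nil, Nat.add_zero]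
        rw [PySem.List.pyGetD_natCast]
      | succ j =>
        have hj' : j < xs.length := by simpa using hj
        have hcast : (k : Int) + 1 = ((k + 1 : Nat) : Int) := by push_cast; ring
        simp only [pvFill, h, if_false, Bool.false_eq_true, List.getElem?_cons_succ,
          List.getD_cons_succ, List.take_succ_cons, List.countP_cons, hx, if_true]
        rw [hcast, ih (k + 1) j hj']
        have harith : k + 1 + List.countP (fun d => d == ".") (xs.take j)
            = k + (List.countP (fun d => d == ".") (xs.take j) + 1) := by omega
        rw [harith]
theorem pv_refrag_alt_eq (l : List String) :
    refrag_alt l = pvFill (pvMov l) (l.take (pvF l)) 0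
      ++ List.replicate (l.length - pvF l) "." := by
  unfold refrag_alt
  have hrep : ((l.length : Int) - ((pvF l : Nat) : Int)).toNat = l.length - pvF l := by
    have := pv_F_le l; omega
  simp only [pv_foldB_count, PySem.List.slice_from_natCast, PySem.List.slice_to_natCast,
    pv_foldB_fill, List.nil_append, hrep]
  rfl

-- ---- movable ----
theorem pv_mov_eq (l : List String) :
    pvMov l = (((pvNds l).drop (pvF l - pvD l)).reverse).map (fun j => l.getD j "") := by
  have hF := pv_F_le l
  have hcd := pv_CD l
  have hD := pv_D_le_F l
  have h5 : (pvNds l).drop (pvF l - pvD l) = (pvNds l).filter (fun a => !decide (a < pvF l)) := by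
    rw [pv_G5 _ (pv_nds_pairwise l) (pvF l)]
    congr 1
    omega
  have h6 : (pvNds l).filter (fun a => !decide (a < pvF l))
      = ((List.range (l.length - pvF l)).filter (fun j => l.getD (pvF l + j) "" != ".")).map
          (pvF l + ·) := by
    unfold pvNds
    rw [List.filter_filter]
    exact pv_RS2 l.length (pvF l) hF _
  have hdrop : l.drop (pvF l)
      = (List.range (l.length - pvF l)).map (fun j => l.getD (pvF l + j) "") := by
    apply List.ext_getElem (by simp)
    intro i h1 h2
    have h1' : i < l.length - pvF l := by simpa using h2
    simp only [List.getElem_map, List.getElem_range]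
    rw [List.getElem_drop, List.getD_eq_getElem l "" (by omega)]
  unfold pvMov
  rw [hdrop, h5, h6]
  rw [List.filter_reverse, List.filter_map, List.map_reverse, List.map_map]
  congr 1
  all_goals exact congrArg _ (List.filter_congr (fun a _ => by simp [Function.comp]))
theorem pv_mov_len (l : List String) : (pvMov l).length = pvD l := by
  rw [pv_mov_eq]
  have hnds := pv_len_nds l
  have := pv_D_le_F l
  simp only [List.length_map, List.length_reverse, List.length_drop, hnds]
  omega
theorem pv_mov_getD (l : List String) (k : Nat) (hk : k < pvD l) :
    (pvMov l).getD k "" = l.getD ((pvTs l).getD k 0) "" := by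
  have hnds := pv_len_nds l
  have hD := pv_D_le_F l
  have hml := pv_mov_len l
  rw [pv_mov_eq]
  have hlen2 : ((((pvNds l).drop (pvF l - pvD l)).reverse).map (fun j => l.getD j "")).length
      = pvD l := by
    simp only [List.length_map, List.length_reverse, List.length_drop, hnds]
    omega
  rw [List.getD_eq_getElem _ _ (by rw [hlen2]; exact hk)]
  simp only [List.getElem_map, List.getElem_reverse, List.getElem_drop]
  rw [pv_ts_getD l k (by omega)]
  rw [List.getD_eq_getElem _ _ (show pvF l - 1 - k < (pvNds l).length by omega)]
  congr 1
  have hlen3 : ((pvNds l).drop (pvF l - pvD l)).length = pvD l := by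
    simp only [List.length_drop, hnds]; omega
  have hidx : pvF l - pvD l + (((pvNds l).drop (pvF l - pvD l)).length - 1 - k)
      = pvF l - 1 - k := by
    rw [hlen3]; omega
  simp only [hidx]

-- ---- main ----
theorem pv_main (l : List String) : refrag l = refrag_alt l := by
  have hF := pv_F_le l
  have hD := pv_D_le_F l
  have hfl : (pvFill (pvMov l) (l.take (pvF l)) 0).length = pvF l := by
    rw [pv_fill_len, List.length_take]
    omega
  rw [pv_refrag_eq_state, pv_refrag_alt_eq]
  apply List.ext_getElem?
  intro j
  by_cases hj : j < l.length
  · by_cases hjF : j < pvF l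
    · -- first region: the fill part
      rw [List.getElem?_append_left (by omega)]
      have h0 : (0 : Int) = ((0 : Nat) : Int) := rfl
      rw [h0, pv_fill_getElem (pvMov l) (l.take (pvF l)) 0 j (by rw [List.length_take]; omega)]
      have htake : (l.take (pvF l)).getD j "" = l.getD j "" := by
        rw [List.getD_eq_getElem _ _ (by rw [List.length_take]; omega), List.getElem_take,
          List.getD_eq_getElem _ _ hj]
      by_cases hdot : l.getD j "" = "."
      · -- a dot below F: filled from the movable queue
        have hmem : j ∈ pvDts l := (pv_mem_dts l j).mpr ⟨hj, hdot⟩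
        obtain ⟨idx, hidxlen, hidxval⟩ := List.getElem_of_mem hmem
        have hidxD : idx < pvD l := by
          apply (pv_dts_lt_F l idx hidxlen).mp
          rw [hidxval]
          exact hjF
        have hdgetD : (pvDts l).getD idx 0 = j := by
          rw [List.getD_eq_getElem _ _ hidxlen, hidxval]
        have hlhs := pv_state_filled l idx hidxD (pvD l) hidxD (le_refl _)
        rw [hdgetD] at hlhs
        rw [hlhs]
        have hxx : ((l.take (pvF l)).getD j "" != ".") = false := by
          rw [htake, hdot]
          simp
        have htt : (l.take (pvF l)).take j = l.take j := by
          rw [List.take_take]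
          congr 1
          omega
        have hcnt : List.countP (fun d => d == ".") (l.take j) = idx := by
          rw [pv_count_take l _ j (by omega)]
          have hds : (List.range j).filter (fun m => l.getD m "" == ".")
              = (pvDts l).filter (fun a => decide (a < j)) := by
            unfold pvDts
            rw [List.filter_filter, pv_RS l.length j (by omega) _]
          rw [hds, show (fun a => decide (a < j)) = (fun a => decide (a < (pvDts l)[idx])) by
            rw [hidxval]]
          exact pv_G3 _ (pv_dts_pairwise l) idx hidxlen
        rw [htt]
        simp only [hxx, Bool.false_eq_true, if_false, hcnt, Nat.zero_add]
        rw [pv_mov_getD l idx hidxD]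
      · -- a block below F: untouched
        have hlhs := pv_state_untouched l (pvD l) (le_refl _) j (by
          intro m hm
          constructor
          · intro hc
            apply hdot
            rw [← hc]
            exact pv_dts_getD_dot l m (lt_of_lt_of_le hm (pv_D_le_len_dts l))
          · intro hc
            have := pv_ts_ge l m hm
            omega)
        rw [hlhs]
        have hxx : ((l.take (pvF l)).getD j "" != ".") = true := by
          rw [htake]
          simpa using hdot
        simp only [hxx, if_true]
        rw [List.getElem?_eq_getElem hj, htake, List.getD_eq_getElem _ _ hj]
    · -- second region: everything at or above F ends as "."
      have hrhs : (pvFill (pvMov l) (l.take (pvF l)) 0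
          ++ List.replicate (l.length - pvF l) ".")[j]? = some "." := by
        rw [List.getElem?_append_right (by omega), hfl]
        rw [List.getElem?_replicate]
        rw [if_pos (by omega)]
      rw [hrhs]
      by_cases hdot : l.getD j "" = "."
      · -- dot at or above F: untouched
        have hlhs := pv_state_untouched l (pvD l) (le_refl _) j (by
          intro m hm
          constructor
          · intro hc
            have := pv_dts_getD_lt_F l m hm
            omega
          · intro hc
            apply pv_ts_nondot l m hm
            rw [hc]
            exact hdot)
        rw [hlhs, List.getElem?_eq_getElem hj, ← List.getD_eq_getElem l "" hj, hdot]
      · -- block at or above F: it was moved, leaving a dot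
        have hmem : j ∈ pvNds l := (pv_mem_nds l j).mpr ⟨hj, hdot⟩
        obtain ⟨m, hmlen, hmval⟩ := List.getElem_of_mem hmem
        have hnds := pv_len_nds l
        have hmF : m < pvF l := by omega
        have hmge : ¬ ((pvNds l).getD m 0 < pvF l) := by
          rw [List.getD_eq_getElem _ _ hmlen, hmval]
          omega
        have hmE : ¬ (m < pvF l - pvD l) := fun hc => hmge ((pv_us_lt_iff l m hmF).mpr hc)
        have hkD : pvF l - 1 - m < pvD l := by omega
        have hts : (pvTs l).getD (pvF l - 1 - m) 0 = j := by
          rw [pv_ts_getD l (pvF l - 1 - m) (by omega),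
            show pvF l - 1 - (pvF l - 1 - m) = m by omega,
            List.getD_eq_getElem _ _ hmlen, hmval]
        have hlhs := pv_state_dotted l (pvF l - 1 - m) hkD (pvD l) hkD (le_refl _)
        rw [hts] at hlhs
        rw [hlhs]
  · -- out of range on both sides
    have h1 : (pvState l (pvD l)).length = l.length := pv_state_len l _
    have h2 : (pvFill (pvMov l) (l.take (pvF l)) 0
        ++ List.replicate (l.length - pvF l) ".").length = l.length := by
      rw [List.length_append, hfl, List.length_replicate]
      omega
    rw [List.getElem?_eq_none (by omega), List.getElem?_eq_none (by omega)]


-- ===== VERDICT (by name: the statement is the Claim_ definition above) =====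
theorem refrag_spec : Claim_equal_refrag := by
  intro l _
  show refrag l = refrag_alt l
  exact pv_main l
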